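-- pv_equiv track=rewrite | github.com/LittleBigKiller/agh-2020-wdi | zestaw_07/zad_03.py | count_arit_seq
-- ===== SOURCE A (Python) =====
-- def count_arit_seq(tab):
--     count = 0
--     current_length = 2
--     current_diff = 0
--
--     i = 1
--     while i < len(tab):
--         if i != 1:
--             if tab[i] - tab[i-1] != current_diff:
--                 if current_length > 2:
--                     count += 1
--
--                 current_length = 2
--                 current_diff = tab[i] - tab[i-1]
--
--             else:
--                 current_length += 1
--         else:
--             current_diff = tab[i] - tab[i-1]
--
--         i += 1
--
--     if current_length > 2:
--         count += 1
--
--     return count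
-- ===== SOURCE B (Python) =====
-- def count_arit_seq(tab):
--     diffs = [b - a for a, b in zip(tab, tab[1:])]
--     total = 0
--     j = 0
--     n = len(diffs)
--     while j < n:
--         k = j + 1
--         while k < n and diffs[k] == diffs[j]:
--             k += 1
--         if k - j >= 2:
--             total += 1
--         j = k
--     return total
-- ===== Notes on version B (the rewrite author's own statement) =====
-- stated objective: alternative
-- what changed: Replaces A's single-pass running (count, current_length, current_diff) state machine over indices with a build-then-scan decomposition: first materialise the consecutive-difference list, then count maximal groups of >=2 equal adjacent differences via a nested two-pointer group scan.
import Mathlib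
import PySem

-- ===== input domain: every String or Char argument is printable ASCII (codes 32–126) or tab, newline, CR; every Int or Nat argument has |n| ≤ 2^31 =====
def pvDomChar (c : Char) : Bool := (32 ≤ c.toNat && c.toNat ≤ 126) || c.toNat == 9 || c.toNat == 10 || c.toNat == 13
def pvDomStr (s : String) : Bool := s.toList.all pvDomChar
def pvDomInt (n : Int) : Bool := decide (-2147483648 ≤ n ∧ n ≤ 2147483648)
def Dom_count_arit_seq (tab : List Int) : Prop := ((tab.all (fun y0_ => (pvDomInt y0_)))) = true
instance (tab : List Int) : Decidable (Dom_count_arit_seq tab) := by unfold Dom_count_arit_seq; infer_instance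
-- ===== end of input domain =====

-- B re-decomposes A's running state machine into: build the consecutive-difference list,
-- then count maximal groups of ≥2 equal adjacent differences (objective: alternative decomposition).

-- ===== PORT A =====
-- loop body of A's while loop (state = (count, current_length, current_diff));
-- indices i and i-1 are always in range (1 ≤ i < len tab), so pyGetD is exact here
def pvStepA (tab : List Int) (st : Int × Int × Int) (i : Int) : Int × Int × Int :=
  if i ≠ 1 then
    if PySem.List.pyGetD tab i 0 - PySem.List.pyGetD tab (i-1) 0 ≠ st.2.2 then
      ((if st.2.1 > 2 then st.1 + 1 else st.1), 2,
        PySem.List.pyGetD tab i 0 - PySem.List.pyGetD tab (i-1) 0)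
    else (st.1, st.2.1 + 1, st.2.2)
  else (st.1, st.2.1, PySem.List.pyGetD tab i 0 - PySem.List.pyGetD tab (i-1) 0)

def count_arit_seq (tab : List Int) : Int :=
  let s := (PySem.List.pyRange 1 (PySem.List.len tab) 1).foldl (pvStepA tab) (0, 2, 0)
  if s.2.1 > 2 then s.1 + 1 else s.1

-- ===== PORT B =====
-- inner while loop of Source B: length of the maximal prefix of xs equal to d, and the rest
def pvTakeRun (d : Int) : List Int → Nat × List Int
  | [] => (0, [])
  | x :: xs => if x = d then ((pvTakeRun d xs).1 + 1, (pvTakeRun d xs).2) else (0, x :: xs)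

lemma pvTakeRun_len (d : Int) (xs : List Int) : (pvTakeRun d xs).2.length ≤ xs.length := by
  induction xs with
  | nil => simp [pvTakeRun]
  | cons x xs ih => by_cases h : x = d <;> simp [pvTakeRun, h] <;> try omega

-- outer while loop of Source B over the diffs list
def pvGroups : List Int → Int
  | [] => 0
  | d :: rest =>
      (if (pvTakeRun d rest).1 + 1 ≥ 2 then (1 : Int) else 0) + pvGroups (pvTakeRun d rest).2
termination_by xs => xs.length
decreasing_by exact Nat.lt_succ_of_le (pvTakeRun_len d rest)

def count_arit_seq_alt (tab : List Int) : Int :=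
  pvGroups (List.zipWith (fun a b => b - a) tab tab.tail)

-- ===== PRECONDITION & SPEC =====
def Spec_count_arit_seq (tab : List Int) (out : Int) : Prop := out = count_arit_seq_alt tab
instance (tab : List Int) (out : Int) : Decidable (Spec_count_arit_seq tab out) := by unfold Spec_count_arit_seq; infer_instance

-- ===== CLAIM (what is proved, stated in full; the proofs are below) =====
def Claim_equal_count_arit_seq : Prop := ∀ (tab : List Int), Dom_count_arit_seq tab → Spec_count_arit_seq tab (count_arit_seq tab)

-- ===== LEMMAS AND PROOFS =====

-- proof-side view of A's step for i ≥ 2: a step on the current difference value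
def pvStepD (st : Int × Int × Int) (x : Int) : Int × Int × Int :=
  if x ≠ st.2.2 then ((if st.2.1 > 2 then st.1 + 1 else st.1), 2, x)
  else (st.1, st.2.1 + 1, st.2.2)

-- A's final wrap-up
def pvFin (s : Int × Int × Int) : Int := if s.2.1 > 2 then s.1 + 1 else s.1

def pvDiffs (tab : List Int) : List Int := List.zipWith (fun a b => b - a) tab tab.tail

lemma pvDiffs_length (tab : List Int) : (pvDiffs tab).length = tab.length - 1 := by
  simp [pvDiffs]

lemma pvDiffs_getElem (tab : List Int) (j : Nat) (h : j < (pvDiffs tab).length) :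
    (pvDiffs tab)[j] = tab[j+1]'(by simp [pvDiffs] at h; omega) - tab[j]'(by simp [pvDiffs] at h; omega) := by
  simp [pvDiffs, List.getElem_tail]

lemma pvBridge (tab : List Int) : ∀ (k i : Nat), tab.length ≤ i + k → 2 ≤ i → ∀ s,
    (PySem.List.pyRange (i : Int) (PySem.List.len tab) 1).foldl (pvStepA tab) s
      = ((pvDiffs tab).drop (i-1)).foldl pvStepD s := by
  intro k
  induction k with
  | zero =>
    intro i hle h2 s
    rw [PySem.List.pyRange_one_eq_nil (by simp; omega),
        List.drop_eq_nil_of_le (by rw [pvDiffs_length]; omega)]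
    rfl
  | succ k ih =>
    intro i hle h2 s
    by_cases hi : tab.length ≤ i
    · rw [PySem.List.pyRange_one_eq_nil (by simp; omega),
          List.drop_eq_nil_of_le (by rw [pvDiffs_length]; omega)]
      rfl
    · push Not at hi
      have hd : i - 1 < (pvDiffs tab).length := by rw [pvDiffs_length]; omega
      rw [PySem.List.pyRange_one_cons (by simp; omega), List.drop_eq_getElem_cons hd]
      simp only [List.foldl_cons]
      have hstep : pvStepA tab s (i : Int) = pvStepD s ((pvDiffs tab)[i-1]) := by
        have hgi : PySem.List.pyGetD tab (i : Int) 0 = tab[i]'hi := by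
          simp [List.getElem?_eq_getElem hi]
        have hcast : ((i : Int)) - 1 = ((i - 1 : Nat) : Int) := by omega
        have hgi1 : PySem.List.pyGetD tab ((i : Int) - 1) 0 = tab[i-1]'(by omega) := by
          rw [hcast]; simp [List.getElem?_eq_getElem (show i - 1 < tab.length by omega)]
        rw [pvDiffs_getElem _ _ hd]
        have hi1 : i - 1 + 1 = i := by omega
        simp only [pvStepA, pvStepD, hgi, hgi1, hi1]
        rw [if_pos (by omega : ((i : Int)) ≠ 1)]
      rw [hstep, show ((i : Int) + 1) = ((i + 1 : Nat) : Int) from by push_cast; ring,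
          ih (i+1) (by omega) (by omega)]
      have : i - 1 + 1 = i + 1 - 1 := by omega
      rw [this]

lemma pvMachine : ∀ (xs : List Int) (c l d : Int),
    pvFin (xs.foldl pvStepD (c, l, d))
      = c + (if l + ((pvTakeRun d xs).1 : Int) > 2 then 1 else 0) + pvGroups (pvTakeRun d xs).2 := by
  intro xs
  induction xs with
  | nil =>
    intro c l d
    simp only [List.foldl_nil, pvFin, pvTakeRun, pvGroups]
    split_ifs <;> omega
  | cons x xs ih =>
    intro c l d
    by_cases h : x = d
    · subst h
      simp only [List.foldl_cons]
      rw [show pvStepD (c, l, x) x = (c, l + 1, x) from by simp [pvStepD],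
          ih c (l+1) x,
          show pvTakeRun x (x :: xs) = ((pvTakeRun x xs).1 + 1, (pvTakeRun x xs).2) from by
            simp [pvTakeRun]]
      push_cast
      split_ifs <;> omega
    · simp only [List.foldl_cons]
      rw [show pvStepD (c, l, d) x = ((if l > 2 then c + 1 else c), 2, x) from by
            simp [pvStepD, h],
          ih,
          show pvTakeRun d (x :: xs) = (0, x :: xs) from by simp [pvTakeRun, h],
          show pvGroups (x :: xs)
              = (if (pvTakeRun x xs).1 + 1 ≥ 2 then (1 : Int) else 0) + pvGroups (pvTakeRun x xs).2
            from by rw [pvGroups]]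
      push_cast
      split_ifs <;> omega

-- ===== VERDICT (by name: the statement is the Claim_ definition above) =====
theorem count_arit_seq_spec : Claim_equal_count_arit_seq := by
  intro tab _
  show count_arit_seq tab = count_arit_seq_alt tab
  rcases tab with _ | ⟨a, _ | ⟨b, t⟩⟩
  · simp [count_arit_seq, count_arit_seq_alt, pvGroups]
  · simp [count_arit_seq, count_arit_seq_alt, pvGroups]
  · have hfin : count_arit_seq (a :: b :: t)
        = pvFin ((PySem.List.pyRange 1 (PySem.List.len (a :: b :: t)) 1).foldl
            (pvStepA (a :: b :: t)) (0, 2, 0)) := rfl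
    rw [hfin, PySem.List.pyRange_one_cons (by simp)]
    simp only [List.foldl_cons]
    rw [show pvStepA (a :: b :: t) (0, 2, 0) 1 = (0, 2, b - a) from by
          simp [pvStepA, pysem],
        show (1 : Int) + 1 = ((2 : Nat) : Int) from by norm_num,
        pvBridge (a :: b :: t) t.length 2 (by simp; omega) (by omega),
        show pvDiffs (a :: b :: t) = (b - a) :: pvDiffs (b :: t) from by simp [pvDiffs],
        show (2 : Nat) - 1 = 1 from rfl, List.drop_one, List.tail_cons,
        pvMachine,
        show count_arit_seq_alt (a :: b :: t) = pvGroups ((b - a) :: pvDiffs (b :: t)) from by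
          simp [count_arit_seq_alt, pvDiffs],
        pvGroups]
    split_ifs <;> omega
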